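-- pv_equiv track=rewrite | github.com/ginop-1/Aoc_2023 | 12.py | isCombinationValid
-- ===== SOURCE A (Python) =====
-- def isCombinationValid(combination, nums):
--     hashtags = [hashtag for hashtag in combination.split(".") if hashtag != ""]
--     if len(hashtags) != len(nums):  # too much or too few hastags
--         return False
--     for hashtag, num in zip(hashtags, nums):
--         if len(hashtag) != num:
--             return False
--     return True
-- ===== SOURCE B (Python) =====
-- def isCombinationValid(combination, nums):
--     run = 0
--     i = 0
--     for ch in combination + ".":
--         if ch == ".":
--             if run:
--                 if i >= len(nums) or run != nums[i]:
--                     return False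
--                 i += 1
--                 run = 0
--         else:
--             run += 1
--     return i == len(nums)
-- ===== Notes on version B (the rewrite author's own statement) =====
-- stated objective: alternative
-- what changed: B replaces A's split-on-'.'-then-filter-then-zip-compare with a single streaming pass over the characters (with a trailing '.' flush) that maintains a current run length and an index into nums, failing eagerly on the first mismatching group.
import Mathlib
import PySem

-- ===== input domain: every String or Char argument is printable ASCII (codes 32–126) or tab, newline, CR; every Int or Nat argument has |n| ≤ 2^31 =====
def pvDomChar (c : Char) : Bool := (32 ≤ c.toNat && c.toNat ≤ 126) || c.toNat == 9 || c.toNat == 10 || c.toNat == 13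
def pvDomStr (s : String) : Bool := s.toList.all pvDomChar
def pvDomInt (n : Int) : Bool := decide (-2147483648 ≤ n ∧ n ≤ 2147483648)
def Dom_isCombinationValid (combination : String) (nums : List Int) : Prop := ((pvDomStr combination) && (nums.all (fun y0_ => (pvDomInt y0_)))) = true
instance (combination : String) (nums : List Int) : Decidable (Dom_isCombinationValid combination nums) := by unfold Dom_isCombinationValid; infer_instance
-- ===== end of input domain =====

-- B replaces split-then-compare with a single streaming pass (run counter + index into nums); same values everywhere (objective: alternative).

-- ===== PORT A =====
-- the for-loop over zip(hashtags, nums) with early return False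
def pvALoop : List (List Char × Int) → Bool
  | [] => true
  | (hashtag, num) :: rest => if (hashtag.length : Int) ≠ num then false else pvALoop rest

def isCombinationValid (combination : String) (nums : List Int) : Bool :=
  let hashtags := (PySem.Chars.splitOn combination.toList ['.']).filter (fun h => h ≠ [])
  if hashtags.length ≠ nums.length then false
  else pvALoop (hashtags.zip nums)

-- ===== PORT B =====
-- the for-loop of Source B: state = (run, i); nums[i] is guarded by i < len(nums), ported as getD
def pvBLoop (nums : List Int) : List Char → Nat → Nat → Bool
  | [], _run, i => i == nums.length
  | c :: rest, run, i =>
    if c = '.' then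
      if run ≠ 0 then
        if i ≥ nums.length ∨ (run : Int) ≠ nums.getD i 0 then false
        else pvBLoop nums rest 0 (i + 1)
      else pvBLoop nums rest run i
    else pvBLoop nums rest (run + 1) i

def isCombinationValid_alt (combination : String) (nums : List Int) : Bool :=
  pvBLoop nums (combination.toList ++ ['.']) 0 0

-- ===== PRECONDITION & SPEC =====
def Spec_isCombinationValid (combination : String) (nums : List Int) (out : Bool) : Prop := out = isCombinationValid_alt combination nums
instance (combination : String) (nums : List Int) (out : Bool) : Decidable (Spec_isCombinationValid combination nums out) := by unfold Spec_isCombinationValid; infer_instance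

-- ===== CLAIM (what is proved, stated in full; the proofs are below) =====
def Claim_equal_isCombinationValid : Prop := ∀ (combination : String) (nums : List Int), Dom_isCombinationValid combination nums → Spec_isCombinationValid combination nums (isCombinationValid combination nums)

-- ===== LEMMAS AND PROOFS =====

-- reference: Python's split(".") written structurally (cur = current piece)
def splitDot (cur : List Char) : List Char → List (List Char)
  | [] => [cur]
  | c :: rest => if c = '.' then cur :: splitDot [] rest else splitDot (cur ++ [c]) rest

-- reference: the run lengths of the maximal non-'.' blocks, with a run already open
def grps (run : Nat) : List Char → List Int
  | [] => if run = 0 then [] else [(run : Int)]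
  | c :: rest => if c = '.' then (if run = 0 then grps 0 rest else (run : Int) :: grps 0 rest)
                 else grps (run + 1) rest

theorem splitOn_go_eq (fuel : Nat) (l cur : List Char) (acc : List (List Char))
    (h : l.length < fuel) :
    PySem.Chars.splitOn.go ['.'] fuel l cur acc = acc.reverse ++ splitDot cur.reverse l := by
  induction fuel generalizing l cur acc with
  | zero => omega
  | succ fuel ih =>
    cases l with
    | nil => simp [PySem.Chars.splitOn.go, splitDot]
    | cons c rest =>
      simp only [PySem.Chars.splitOn.go, List.isPrefixOf, splitDot]
      by_cases hc : c = '.'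
      · simp [hc, ih rest [] (cur.reverse :: acc) (by simp at h ⊢; omega)]
      · rw [if_neg (by simp [Ne.symm hc]), if_neg hc,
          ih rest (c :: cur) acc (by simp at h ⊢; omega)]
        simp

theorem splitOn_eq_splitDot (cs : List Char) :
    PySem.Chars.splitOn cs ['.'] = splitDot [] cs := by
  rw [PySem.Chars.splitOn, splitOn_go_eq (cs.length + 1) cs [] [] (by omega)]
  simp

theorem splitDot_grps (cs cur : List Char) :
    ((splitDot cur cs).filter (fun h => h ≠ [])).map (fun h => (h.length : Int))
      = grps cur.length cs := by
  induction cs generalizing cur with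
  | nil =>
    by_cases h : cur = [] <;> simp [splitDot, grps, h, List.length_eq_zero_iff]
  | cons c rest ih =>
    simp only [ne_eq] at ih
    by_cases hc : c = '.'
    · by_cases h : cur = []
      · simpa [splitDot, grps, hc, h] using ih []
      · have hl : cur.length ≠ 0 := by simpa [List.length_eq_zero_iff] using h
        simpa [splitDot, grps, hc, hl, h] using ih []
    · have := ih (cur ++ [c])
      simp only [List.length_append, List.length_singleton] at this
      simpa [splitDot, grps, hc] using this

theorem aLoop_eq (hs : List (List Char)) (nums : List Int) (h : hs.length = nums.length) :
    pvALoop (hs.zip nums) = decide (hs.map (fun g => (g.length : Int)) = nums) := by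
  induction hs generalizing nums with
  | nil => cases nums <;> simp_all [pvALoop]
  | cons g gs ih =>
    cases nums with
    | nil => simp at h
    | cons n ns =>
      simp only [List.zip_cons_cons, pvALoop, List.map_cons]
      by_cases hn : (g.length : Int) = n
      · simp [hn, ih ns (by simpa using h)]
      · simp [hn]

theorem a_eq_decide (cs : List Char) (nums : List Int) :
    (let hashtags := (PySem.Chars.splitOn cs ['.']).filter (fun h => h ≠ []);
      if hashtags.length ≠ nums.length then false else pvALoop (hashtags.zip nums))
    = decide (grps 0 cs = nums) := by
  simp only [splitOn_eq_splitDot]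
  have hm := splitDot_grps cs []
  simp only [List.length_nil] at hm
  by_cases h : ((splitDot [] cs).filter (fun h => h ≠ [])).length = nums.length
  · simp only [ne_eq, h, not_true_eq_false, if_false, aLoop_eq _ _ h, hm]
  · have hne : grps 0 cs ≠ nums := by
      intro he
      rw [← hm] at he
      exact h (by simpa using congrArg List.length he)
    simp only [hne, decide_false]
    simp only [ne_eq, ite_not, ite_eq_right_iff]
    intro hh
    exact absurd hh (by simpa using h)

theorem bLoop_eq (nums : List Int) (cs : List Char) (run i : Nat) (hi : i ≤ nums.length) :
    pvBLoop nums (cs ++ ['.']) run i = decide (nums.drop i = grps run cs) := by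
  induction cs generalizing run i with
  | nil =>
    by_cases hr : run = 0
    · rcases Nat.lt_or_ge i nums.length with h | h
      · have h1 : i ≠ nums.length := by omega
        have h2 : nums.drop i ≠ [] := by
          simpa [List.drop_eq_nil_iff] using (by omega : ¬ nums.length ≤ i)
        simp [pvBLoop, grps, hr, h1, h2]
      · have h1 : i = nums.length := by omega
        simp [pvBLoop, grps, hr, h1]
    · by_cases hg : i ≥ nums.length ∨ (run : Int) ≠ nums.getD i 0
      · have hne : nums.drop i ≠ [(run : Int)] := by
          intro he
          have hlen := congrArg List.length he
          simp [List.length_drop] at hlen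
          have hilt : i < nums.length := by omega
          have hval : nums.getD i 0 = (run : Int) := by
            have := congrArg (fun l => l.getD 0 0) he
            simpa [List.getD, List.getElem?_drop] using this
          rcases hg with h | h
          · omega
          · exact h hval.symm
        have hrhs : grps run [] = [(run : Int)] := by simp [grps, hr]
        simp only [hrhs]
        rw [decide_eq_false hne]
        simp only [List.nil_append, pvBLoop]
        rw [if_pos hr, if_pos hg]
        simp
      · rcases not_or.mp hg with ⟨h1, h2⟩
        have hlt : i < nums.length := by omega
        have hval : (run : Int) = nums.getD i 0 := not_not.mp h2
        have hR : nums.drop i = (run : Int) :: nums.drop (i + 1) := by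
          rw [hval, List.getD_eq_getElem _ _ hlt]
          exact (List.getElem_cons_drop hlt).symm
        have hval' : ((run : Nat) : Int) = nums[i]?.getD 0 := by simpa [List.getD] using hval
        have hL : pvBLoop nums ([] ++ ['.']) run i = (i + 1 == nums.length) := by
          simp [pvBLoop, hr, hlt, hval']
        rw [hL]
        simp only [grps, hr, if_false, hR]
        rcases Nat.lt_or_ge (i + 1) nums.length with h | h
        · have h2' : nums.drop (i + 1) ≠ [] := by
            simpa [List.drop_eq_nil_iff] using (by omega : ¬ nums.length ≤ i + 1)
          simp [show i + 1 ≠ nums.length by omega, h2']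
        · have h1' : i + 1 = nums.length := by omega
          simp [h1']
  | cons c rest ih =>
    by_cases hc : c = '.'
    · subst hc
      by_cases hr : run = 0
      · subst hr
        simpa [pvBLoop, grps] using ih 0 i hi
      · by_cases hg : i ≥ nums.length ∨ (run : Int) ≠ nums.getD i 0
        · have hne : nums.drop i ≠ (run : Int) :: grps 0 rest := by
            intro he
            have hdne : nums.drop i ≠ [] := by simp [he]
            have hlt : i < nums.length := by
              by_contra hh
              exact hdne (List.drop_eq_nil_iff.mpr (by omega))
            have hval : nums.getD i 0 = (run : Int) := by
              have := congrArg (fun l => l.getD 0 0) he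
              simpa [List.getD, List.getElem?_drop] using this
            rcases hg with h | h
            · omega
            · exact h hval.symm
          have hrhs : grps run ('.' :: rest) = (run : Int) :: grps 0 rest := by
            simp [grps, hr]
          simp only [hrhs]
          rw [decide_eq_false hne]
          simp only [List.cons_append, pvBLoop]
          rw [if_pos hr, if_pos hg]
          simp
        simp
        · rcases not_or.mp hg with ⟨h1, h2⟩
          have hlt : i < nums.length := by omega
          have hval : (run : Int) = nums.getD i 0 := not_not.mp h2
          have hR : nums.drop i = (run : Int) :: nums.drop (i + 1) := by
            rw [hval, List.getD_eq_getElem _ _ hlt]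
            exact (List.getElem_cons_drop hlt).symm
          have hval' : ((run : Nat) : Int) = nums[i]?.getD 0 := by simpa [List.getD] using hval
          have hL : pvBLoop nums ('.' :: (rest ++ ['.'])) run i
              = pvBLoop nums (rest ++ ['.']) 0 (i + 1) := by
            simp [pvBLoop, hr, hlt, hval']
          rw [hL, ih 0 (i + 1) (by omega)]
          simp [grps, hr, hR]
    · simpa [pvBLoop, grps, hc] using ih (run + 1) i hi

-- ===== VERDICT (by name: the statement is the Claim_ definition above) =====
theorem isCombinationValid_spec : Claim_equal_isCombinationValid := by
  intro combination nums _hdom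
  unfold Spec_isCombinationValid isCombinationValid isCombinationValid_alt
  rw [bLoop_eq nums combination.toList 0 0 (Nat.zero_le _), a_eq_decide]
  simp [eq_comm]
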